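-- pv_equiv track=rewrite | github.com/caumannerman/Algorithm_Train | KAKAO_기출문제/2022KAKAO_BLIND_신고결과받기.py | solution
-- ===== SOURCE A (Python) =====
-- def solution(id_list, report, k):
--     # id별 누구를 신고했는지 set형태로 저장
--     id_report_list = {}
--     # 각 id별 번호를 부여 차례로..0~
--     id_sequence = {}
--
--     for i in id_list:
--         id_report_list[i] = set()
--     # 각 id별 번호를 부여 차례로..0~
--     for i in range(len(id_list)):
--         id_sequence[id_list[i]] = i
--
--     # id_report_list에 각 id가 누구누구를 신고했는지 set(1,3,4)와 같이 저장
--     for i in report: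
--         sender, receiver = i.split()
--         id_report_list[sender].add(id_sequence[receiver])
--
--     # 각 id 별 신고당한 횟수를 나타낼 리스트
--     report_num_list = [0] * len(id_list)
--     for i in id_report_list.values():
--         for j in i:
--             report_num_list[j] += 1
--
--     # 처벌자 명단 0,1,5 ... 과 같이 id 순서로 저장
--     punished = set()
--     for i in range(len(report_num_list)):
--         if report_num_list[i] >= k:
--             punished.add(i)
--
--     del report_num_list
--     result = [0] * len(id_list)
--
--     for i in id_list:
--         result[id_sequence[i]] += len(id_report_list[i] & punished)
--
--     return result
-- ===== SOURCE B (Python) =====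
-- def solution(id_list, report, k):
--     idx = {v: i for i, v in enumerate(id_list)}
--     # receiver -> set of distinct senders who reported them
--     reporters = {}
--     for r in report:
--         sender, receiver = r.split()
--         reporters.setdefault(receiver, set()).add(sender)
--     result = [0] * len(id_list)
--     for senders in reporters.values():
--         if len(senders) >= k:
--             for s in senders:
--                 result[idx[s]] += 1
--     return result
-- ===== Notes on version B (the rewrite author's own statement) =====
-- stated objective: simpler
-- what changed: Replaces A's sender-keyed index-sets, separate count array, punished set and per-sender set intersection with one receiver-keyed dict of distinct senders and a single threshold-and-distribute pass that increments each reporter's slot directly.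
-- outside the precondition, e.g. on solution(['a', 'a', 'b'], ['a b'], 1): A returns [0, 2, 0], B returns [0, 1, 0]
import Mathlib
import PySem

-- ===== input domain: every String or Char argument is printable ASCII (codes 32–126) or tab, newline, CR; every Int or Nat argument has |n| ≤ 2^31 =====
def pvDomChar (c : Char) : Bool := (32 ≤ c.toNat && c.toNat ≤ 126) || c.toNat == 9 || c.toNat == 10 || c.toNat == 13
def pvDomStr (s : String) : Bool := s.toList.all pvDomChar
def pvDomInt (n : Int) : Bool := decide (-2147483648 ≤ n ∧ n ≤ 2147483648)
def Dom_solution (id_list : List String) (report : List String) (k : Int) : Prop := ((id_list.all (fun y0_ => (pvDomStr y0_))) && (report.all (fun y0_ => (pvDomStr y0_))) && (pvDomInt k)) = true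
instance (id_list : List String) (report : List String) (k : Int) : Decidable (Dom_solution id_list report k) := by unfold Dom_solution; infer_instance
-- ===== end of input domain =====

-- B replaces A's sender-keyed index-sets + count array + punished set + per-sender intersection
-- with a receiver-keyed dict of distinct senders and one threshold-and-distribute pass (objective: simpler).

-- ===== PORT A =====
-- Python `l[j] += a`: exact for 0 ≤ j < len(l) (the only case reached under Pre_); no-op outside.
def incrAt (l : List Int) (j : Int) (a : Int) : List Int :=
  if h : 0 ≤ j ∧ j.toNat < l.length then l.set j.toNat (l[j.toNat]'h.2 + a) else l

def solution (id_list : List String) (report : List String) (k : Int) : List Int :=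
  -- id_report_list = {i: set() for loop}
  let id_report_list : PySem.Dict String (PySem.Set Int) :=
    id_list.foldl (fun d i => d.insert i PySem.Set.empty) PySem.Dict.empty
  -- for i in range(len(id_list)): id_sequence[id_list[i]] = i
  let id_sequence : PySem.Dict String Int :=
    (PySem.List.pyRange 0 (id_list.length : Int)).foldl
      (fun d i => d.insert (PySem.List.pyGetD id_list i "") i) PySem.Dict.empty
  -- for i in report: sender, receiver = i.split(); id_report_list[sender].add(id_sequence[receiver])
  -- (getD defaults are only reached outside Pre_, where Python raises)
  let id_report_list := report.foldl (fun d i =>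
      d.modify (PySem.List.pyGetD (PySem.Str.split₀ i) 0 "") PySem.Set.empty
        (fun s => PySem.Set.add s
          (id_sequence.getD (PySem.List.pyGetD (PySem.Str.split₀ i) 1 "") 0))) id_report_list
  -- report_num_list = [0]*len; for i in values: for j in i: report_num_list[j] += 1
  let report_num_list : List Int :=
    id_report_list.values.foldl (fun l i => i.foldl (fun l j => incrAt l j 1) l)
      (List.replicate id_list.length 0)
  -- punished = {i for i in range(len) if report_num_list[i] >= k}
  let punished : PySem.Set Int :=
    (PySem.List.pyRange 0 (report_num_list.length : Int)).foldl
      (fun p i => if PySem.List.pyGetD report_num_list i 0 ≥ k then PySem.Set.add p i else p)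
      PySem.Set.empty
  -- result = [0]*len; for i in id_list: result[id_sequence[i]] += len(id_report_list[i] & punished)
  id_list.foldl (fun res i =>
      incrAt res (id_sequence.getD i 0)
        (PySem.Set.len (PySem.Set.inter (id_report_list.getD i PySem.Set.empty) punished)))
    (List.replicate id_list.length 0)

-- ===== PORT B =====
def solution_alt (id_list : List String) (report : List String) (k : Int) : List Int :=
  -- idx = {v: i for i, v in enumerate(id_list)}
  let idx : PySem.Dict String Int :=
    id_list.zipIdx.foldl (fun d p => d.insert p.1 (p.2 : Int)) PySem.Dict.empty
  -- for r in report: sender, receiver = r.split(); reporters.setdefault(receiver, set()).add(sender)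
  let reporters : PySem.Dict String (PySem.Set String) :=
    report.foldl (fun d r =>
      d.modify (PySem.List.pyGetD (PySem.Str.split₀ r) 1 "") PySem.Set.empty
        (fun s => PySem.Set.add s (PySem.List.pyGetD (PySem.Str.split₀ r) 0 "")))
      PySem.Dict.empty
  -- result = [0]*len; for senders in reporters.values(): if len(senders) >= k: for s in senders: result[idx[s]] += 1
  reporters.values.foldl (fun result senders =>
      if k ≤ PySem.Set.len senders then
        senders.foldl (fun result s => incrAt result (idx.getD s 0) 1) result
      else result)
    (List.replicate id_list.length 0)

-- ===== PRECONDITION & SPEC =====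
-- Pre_ excludes (a) reports that do not split into exactly two tokens both present in id_list, on
-- which A raises (ValueError / KeyError), and (b) id_lists with duplicate ids, a corner no caller
-- specifies, where A accidentally adds the same sender's count once per duplicate occurrence.
def Pre_solution (id_list : List String) (report : List String) (_k : Int) : Prop :=
  id_list.Nodup ∧
    ∀ r ∈ report, (PySem.Str.split₀ r).length = 2 ∧ ∀ p ∈ PySem.Str.split₀ r, p ∈ id_list
instance (id_list : List String) (report : List String) (k : Int) :
    Decidable (Pre_solution id_list report k) := by unfold Pre_solution; infer_instance

def pvWitness_solution : List String × List String × Int :=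
  (["muzi", "frodo", "apeach"], ["muzi frodo", "apeach frodo", "frodo muzi"], 2)

def Spec_solution (id_list : List String) (report : List String) (k : Int) (out : List Int) : Prop := out = solution_alt id_list report k
instance (id_list : List String) (report : List String) (k : Int) (out : List Int) : Decidable (Spec_solution id_list report k out) := by unfold Spec_solution; infer_instance

-- ===== CLAIM (what is proved, stated in full; the proofs are below) =====
def Claim_equal_solution : Prop := ∀ (id_list : List String) (report : List String) (k : Int), Dom_solution id_list report k → Pre_solution id_list report k → Spec_solution id_list report k (solution id_list report k)

-- ===== LEMMAS AND PROOFS =====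

theorem incrAt_length (l : List Int) (j a : Int) : (incrAt l j a).length = l.length := by
  unfold incrAt; split <;> simp

theorem length_foldl_incrAt {α : Type} (l : List α) (pos amt : α → Int) (init : List Int) :
    (l.foldl (fun res x => incrAt res (pos x) (amt x)) init).length = init.length := by
  induction l generalizing init with
  | nil => rfl
  | cons x t ih => simp [List.foldl_cons, ih, incrAt_length]

theorem getElem_incrAt (l : List Int) (j a : Int) (i : Nat) (hi : i < l.length) :
    (incrAt l j a)[i]'(by rw [incrAt_length]; exact hi) =
      if j = (i : Int) then l[i] + a else l[i] := by
  unfold incrAt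
  split
  · rename_i h
    simp only [List.getElem_set]
    by_cases hj : j = (i : Int)
    · have hti : j.toNat = i := by omega
      subst hti
      rw [if_pos rfl, if_pos hj]
    · rw [if_neg (by omega), if_neg hj]
  · rename_i h
    rw [if_neg (by intro he; apply h; constructor <;> omega)]

theorem getElem_foldl_incrAt {α : Type} (l : List α) (pos amt : α → Int) (init : List Int)
    (i : Nat) (hi : i < init.length) :
    (l.foldl (fun res x => incrAt res (pos x) (amt x)) init)[i]'(by
        rw [length_foldl_incrAt]; exact hi) =
      init[i] + ((l.filter (fun x => pos x == (i : Int))).map amt).sum := by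
  induction l generalizing init with
  | nil => simp
  | cons x t ih =>
    simp only [List.foldl_cons]
    rw [ih _ (by rw [incrAt_length]; exact hi)]
    rw [getElem_incrAt init (pos x) (amt x) i hi]
    by_cases h : pos x = (i : Int)
    · simp [h, add_assoc, add_comm, add_left_comm]
    · simp [h]

theorem getD_empties (il : List String) (x : String) (d : PySem.Dict String (PySem.Set Int))
    (hd : d.getD x PySem.Set.empty = PySem.Set.empty) :
    ((il.foldl (fun d i => d.insert i PySem.Set.empty) d).getD x PySem.Set.empty)
      = PySem.Set.empty := by
  induction il generalizing d with
  | nil => exact hd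
  | cons y t ih =>
    simp only [List.foldl_cons]
    apply ih
    rw [PySem.Dict.getD_insert]
    split
    · rfl
    · exact hd

theorem getD_foldl_modify_addset {κ ν β : Type} [BEq κ] [LawfulBEq κ] [DecidableEq κ] [BEq ν]
    (l : List β) (key : β → κ) (f : β → ν) (d : PySem.Dict κ (PySem.Set ν)) (x : κ) :
    ((l.foldl (fun d a => d.modify (key a) PySem.Set.empty
        (fun s => PySem.Set.add s (f a))) d).getD x PySem.Set.empty)
      = PySem.Set.update (d.getD x PySem.Set.empty) ((l.filter (fun a => key a == x)).map f) := by
  induction l generalizing d with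
  | nil => simp [PySem.Set.update]
  | cons a t ih =>
    simp only [List.foldl_cons, List.filter_cons]
    rw [ih]
    by_cases h : key a = x
    · rw [PySem.Dict.getD_modify]
      simp [h, PySem.Set.update_cons]
    · rw [PySem.Dict.getD_modify]
      simp [Ne.symm h, beq_eq_false_iff_ne.mpr h]

theorem getD_range_insert (il : List String) (hnd : il.Nodup) (m : Nat) (hm : m ≤ il.length)
    (x : String) (d0 : Int) :
    (((List.range m).foldl (fun d i => d.insert (il.getD i "") (i : Int))
        PySem.Dict.empty).getD x d0)
      = if x ∈ il.take m then (il.idxOf x : Int) else d0 := by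
  induction m with
  | zero => simp
  | succ m ih =>
    rw [List.range_succ, List.foldl_append]
    simp only [List.foldl_cons, List.foldl_nil]
    rw [PySem.Dict.getD_insert]
    have hm' : m < il.length := hm
    have hget : il.getD m "" = il[m] := List.getD_eq_getElem il "" hm'
    by_cases h : x = il[m]
    · rw [if_pos (by rw [hget]; exact h)]
      rw [if_pos (by
        rw [List.take_add_one, List.getElem?_eq_getElem hm']
        exact h ▸ List.mem_append_right _ (by exact List.mem_singleton.mpr rfl))]
      subst h
      rw [List.Nodup.idxOf_getElem hnd m hm']
    · rw [if_neg (by rw [hget]; exact h)]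
      rw [ih (le_of_lt hm')]
      have hmem : (x ∈ List.take (m + 1) il) ↔ (x ∈ List.take m il) := by
        rw [List.take_add_one, List.getElem?_eq_getElem hm']
        constructor
        · intro hx
          rcases List.mem_append.mp hx with h1 | h1
          · exact h1
          · exact absurd (List.mem_singleton.mp h1) h
        · exact List.mem_append_left _
      simp only [hmem]

-- both ports' index dicts are the same fold over `List.range`
theorem iseq_eq_range (il : List String) :
    ((PySem.List.pyRange 0 (il.length : Int)).foldl
        (fun d i => d.insert (PySem.List.pyGetD il i "") i) PySem.Dict.empty)
      = ((List.range il.length).foldl (fun d i => d.insert (il.getD i "") (i : Int))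
          PySem.Dict.empty) := by
  rw [PySem.List.pyRange_zero_natCast, List.foldl_map]
  apply PySem.List.foldl_congr_mem
  intro acc i _
  rw [PySem.List.pyGetD_natCast]

theorem idx_eq_range (il : List String) :
    (il.zipIdx.foldl (fun d p => d.insert p.1 (p.2 : Int)) PySem.Dict.empty)
      = ((List.range il.length).foldl (fun d i => d.insert (il.getD i "") (i : Int))
          PySem.Dict.empty) := by
  have h : il.zipIdx = (List.range il.length).map (fun i => (il.getD i "", i)) := by
    apply List.ext_getElem
    · simp
    · intro i h1 h2
      have hi : i < il.length := by simpa using h1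
      simp [List.getElem_zipIdx, List.getElem?_eq_getElem hi]
  rw [h, List.foldl_map]

theorem sum_map_one_int {α : Type} (l : List α) :
    (l.map (fun _ => (1 : Int))).sum = (l.length : Int) := by
  induction l with
  | nil => rfl
  | cons x t ih => rw [List.map_cons, List.sum_cons, ih, List.length_cons]; push_cast; ring

theorem countP_flatten {α : Type} (p : α → Bool) (L : List (List α)) :
    List.countP p L.flatten = (L.map (List.countP p)).sum := by
  induction L with
  | nil => rfl
  | cons l t ih => simp [List.countP_append, ih]

-- two Nodup lists whose filtered memberships agree have equal counts
theorem countP_eq_of_iff {α : Type} [DecidableEq α] (l₁ l₂ : List α) (p q : α → Bool)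
    (h₁ : l₁.Nodup) (h₂ : l₂.Nodup)
    (h : ∀ y, (y ∈ l₁ ∧ p y = true) ↔ (y ∈ l₂ ∧ q y = true)) :
    l₁.countP p = l₂.countP q := by
  rw [List.countP_eq_length_filter, List.countP_eq_length_filter]
  apply List.Perm.length_eq
  rw [List.perm_ext_iff_of_nodup (h₁.filter p) (h₂.filter q)]
  intro a
  simp only [List.mem_filter]
  exact h a

theorem countP_nodup_sub {α : Type} [DecidableEq α] (l s : List α) (hl : l.Nodup) (hs : s.Nodup)
    (hsub : ∀ y ∈ s, y ∈ l) :
    l.countP (fun x => decide (x ∈ s)) = s.length := by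
  rw [List.countP_eq_length_filter]
  apply List.Perm.length_eq
  rw [List.perm_ext_iff_of_nodup (hl.filter _) hs]
  intro a
  simp only [List.mem_filter, decide_eq_true_eq]
  exact ⟨fun h => h.2, fun h => ⟨hsub a h, h⟩⟩

theorem ofList_map_inj {α β : Type} [DecidableEq α] [DecidableEq β] (l : List α) (f : α → β)
    (hinj : ∀ a ∈ l, ∀ b ∈ l, f a = f b → a = b) :
    PySem.Set.ofList (l.map f) = (PySem.Set.ofList l).map f := by
  induction l using List.reverseRecOn with
  | nil => rfl
  | append_singleton t a ih =>
    rw [List.map_append, List.map_singleton, PySem.Set.ofList_append_singleton,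
      PySem.Set.ofList_append_singleton,
      ih (fun x hx y hy => hinj x (by simp [hx]) y (by simp [hy]))]
    rw [PySem.Set.add_eq_ite, PySem.Set.add_eq_ite]
    by_cases h : a ∈ PySem.Set.ofList t
    · rw [if_pos (List.mem_map.mpr ⟨a, h, rfl⟩), if_pos h]
    · rw [if_neg, if_neg h, List.map_append, List.map_singleton]
      intro hc
      obtain ⟨b, hb, hfb⟩ := List.mem_map.mp hc
      have hbt : b ∈ t := by simpa using hb
      have hba : b = a := hinj b (List.mem_append_left _ hbt) a (by simp) hfb
      exact h (hba ▸ hb)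

-- proof-side names for the two ports' intermediate structures (definitionally the zeta-reduced lets)
def pairOf (r : String) : String × String :=
  (PySem.List.pyGetD (PySem.Str.split₀ r) 0 "", PySem.List.pyGetD (PySem.Str.split₀ r) 1 "")

def dictSeq (il : List String) : PySem.Dict String Int :=
  (PySem.List.pyRange 0 (il.length : Int)).foldl
    (fun d i => d.insert (PySem.List.pyGetD il i "") i) PySem.Dict.empty

def dictIdx (il : List String) : PySem.Dict String Int :=
  il.zipIdx.foldl (fun d p => d.insert p.1 (p.2 : Int)) PySem.Dict.empty

def dictIrl (il rep : List String) : PySem.Dict String (PySem.Set Int) :=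
  rep.foldl (fun d i =>
      d.modify (PySem.List.pyGetD (PySem.Str.split₀ i) 0 "") PySem.Set.empty
        (fun s => PySem.Set.add s
          ((dictSeq il).getD (PySem.List.pyGetD (PySem.Str.split₀ i) 1 "") 0)))
    (il.foldl (fun d i => d.insert i PySem.Set.empty) PySem.Dict.empty)

def listRnl (il rep : List String) : List Int :=
  (dictIrl il rep).values.foldl (fun l i => i.foldl (fun l j => incrAt l j 1) l)
    (List.replicate il.length 0)

def setPun (il rep : List String) (k : Int) : PySem.Set Int :=
  (PySem.List.pyRange 0 ((listRnl il rep).length : Int)).foldl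
    (fun p i => if PySem.List.pyGetD (listRnl il rep) i 0 ≥ k then PySem.Set.add p i else p)
    PySem.Set.empty

def dictRep (rep : List String) : PySem.Dict String (PySem.Set String) :=
  rep.foldl (fun d r =>
      d.modify (PySem.List.pyGetD (PySem.Str.split₀ r) 1 "") PySem.Set.empty
        (fun s => PySem.Set.add s (PySem.List.pyGetD (PySem.Str.split₀ r) 0 "")))
    PySem.Dict.empty

-- abstract (proof-only) views of the report data
def SD (rep : List String) (y : String) : List String :=
  PySem.Set.ofList ((rep.filter (fun r => (pairOf r).2 == y)).map (fun r => (pairOf r).1))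

def RCVx (rep : List String) (x0 : String) : List String :=
  PySem.Set.ofList ((rep.filter (fun r => (pairOf r).1 == x0)).map (fun r => (pairOf r).2))

def KEYS (rep : List String) : List String :=
  PySem.Set.ofList (rep.map (fun r => (pairOf r).2))

theorem sol_eq (il rep : List String) (k : Int) :
    solution il rep k =
      il.foldl (fun res i =>
        incrAt res ((dictSeq il).getD i 0)
          (PySem.Set.len (PySem.Set.inter ((dictIrl il rep).getD i PySem.Set.empty)
            (setPun il rep k))))
        (List.replicate il.length 0) := rfl

theorem sol_alt_eq (il rep : List String) (k : Int) :
    solution_alt il rep k =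
      (dictRep rep).values.foldl (fun result senders =>
        if k ≤ PySem.Set.len senders then
          senders.foldl (fun result s => incrAt result ((dictIdx il).getD s 0) 1) result
        else result)
        (List.replicate il.length 0) := rfl

theorem mem_SD (rep : List String) (y x : String) :
    x ∈ SD rep y ↔ ∃ r ∈ rep, (pairOf r).1 = x ∧ (pairOf r).2 = y := by
  simp only [SD, PySem.Set.mem_ofList, List.mem_map, List.mem_filter, beq_iff_eq]
  tauto

theorem mem_RCVx (rep : List String) (x0 y : String) :
    y ∈ RCVx rep x0 ↔ ∃ r ∈ rep, (pairOf r).1 = x0 ∧ (pairOf r).2 = y := by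
  simp only [RCVx, PySem.Set.mem_ofList, List.mem_map, List.mem_filter, beq_iff_eq]
  tauto

theorem mem_KEYS (rep : List String) (y : String) :
    y ∈ KEYS rep ↔ ∃ r ∈ rep, (pairOf r).2 = y := by
  simp only [KEYS, PySem.Set.mem_ofList, List.mem_map]

theorem mem_SD_iff_mem_RCVx (rep : List String) (x y : String) :
    x ∈ SD rep y ↔ y ∈ RCVx rep x := by
  rw [mem_SD, mem_RCVx]

theorem RCVx_sub_KEYS (rep : List String) (x0 y : String) (h : y ∈ RCVx rep x0) :
    y ∈ KEYS rep := by
  rw [mem_RCVx] at h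
  rw [mem_KEYS]
  obtain ⟨r, hr, _, h2⟩ := h
  exact ⟨r, hr, h2⟩

-- the precondition, named
def PreRep (il rep : List String) : Prop :=
  ∀ r ∈ rep, (PySem.Str.split₀ r).length = 2 ∧ ∀ p ∈ PySem.Str.split₀ r, p ∈ il

theorem pair_mem (il rep : List String) (hrep : PreRep il rep) (r : String) (hr : r ∈ rep) :
    (pairOf r).1 ∈ il ∧ (pairOf r).2 ∈ il := by
  obtain ⟨h2, hmem⟩ := hrep r hr
  have h0 : 0 < (PySem.Str.split₀ r).length := by omega
  have h1 : 1 < (PySem.Str.split₀ r).length := by omega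
  constructor
  · apply hmem
    simp only [pairOf, PySem.List.pyGetD_ofNat', List.getD_eq_getElem _ _ h0]
    exact List.getElem_mem h0
  · apply hmem
    simp only [pairOf, PySem.List.pyGetD_ofNat', List.getD_eq_getElem _ _ h1]
    exact List.getElem_mem h1

theorem SD_sub (il rep : List String) (hrep : PreRep il rep) (y : String) :
    ∀ x ∈ SD rep y, x ∈ il := by
  intro x hx
  rw [mem_SD] at hx
  obtain ⟨r, hr, h1, _⟩ := hx
  exact h1 ▸ (pair_mem il rep hrep r hr).1

theorem RCVx_sub (il rep : List String) (hrep : PreRep il rep) (x0 : String) :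
    ∀ y ∈ RCVx rep x0, y ∈ il := by
  intro y hy
  rw [mem_RCVx] at hy
  obtain ⟨r, hr, _, h2⟩ := hy
  exact h2 ▸ (pair_mem il rep hrep r hr).2

theorem idxOf_inj (il : List String) (_hnd : il.Nodup) (a b : String) (ha : a ∈ il) (hb : b ∈ il)
    (h : il.idxOf a = il.idxOf b) : a = b := by
  have h1 : il[il.idxOf a]'(List.idxOf_lt_length_of_mem ha) = a := List.getElem_idxOf _
  have h2 : il[il.idxOf b]'(List.idxOf_lt_length_of_mem hb) = b := List.getElem_idxOf _
  rw [← h1, ← h2]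
  simp only [h]

theorem dictSeq_getD (il : List String) (hnd : il.Nodup) (x : String) (hx : x ∈ il) :
    (dictSeq il).getD x 0 = (il.idxOf x : Int) := by
  unfold dictSeq
  rw [iseq_eq_range, getD_range_insert il hnd il.length le_rfl, List.take_length, if_pos hx]

theorem dictIdx_getD (il : List String) (hnd : il.Nodup) (x : String) (hx : x ∈ il) :
    (dictIdx il).getD x 0 = (il.idxOf x : Int) := by
  unfold dictIdx
  rw [idx_eq_range, getD_range_insert il hnd il.length le_rfl, List.take_length, if_pos hx]

theorem dictRep_getD (rep : List String) (y : String) :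
    (dictRep rep).getD y PySem.Set.empty = SD rep y := by
  unfold dictRep
  rw [getD_foldl_modify_addset rep (fun r => PySem.List.pyGetD (PySem.Str.split₀ r) 1 "")
    (fun r => PySem.List.pyGetD (PySem.Str.split₀ r) 0 "") PySem.Dict.empty y]
  rw [PySem.Dict.getD_empty, PySem.Set.update_empty]
  simp only [SD, pairOf]

theorem dictIrl_getD (il rep : List String) (x : String) :
    (dictIrl il rep).getD x PySem.Set.empty =
      PySem.Set.ofList ((rep.filter (fun r => (pairOf r).1 == x)).map
        (fun r => (dictSeq il).getD (pairOf r).2 0)) := by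
  unfold dictIrl
  rw [getD_foldl_modify_addset rep (fun r => PySem.List.pyGetD (PySem.Str.split₀ r) 0 "")
    (fun r => (dictSeq il).getD (PySem.List.pyGetD (PySem.Str.split₀ r) 1 "") 0) _ x]
  rw [getD_empties il x PySem.Dict.empty (PySem.Dict.getD_empty _ _), PySem.Set.update_empty]
  simp only [pairOf]

theorem dictIrl_getD' (il rep : List String) (hnd : il.Nodup) (hrep : PreRep il rep) (x : String) :
    (dictIrl il rep).getD x PySem.Set.empty =
      (RCVx rep x).map (fun y => (il.idxOf y : Int)) := by
  rw [dictIrl_getD]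
  have h1 : (rep.filter (fun r => (pairOf r).1 == x)).map
        (fun r => (dictSeq il).getD (pairOf r).2 0)
      = ((rep.filter (fun r => (pairOf r).1 == x)).map (fun r => (pairOf r).2)).map
        (fun y => (il.idxOf y : Int)) := by
    rw [List.map_map]
    apply List.map_congr_left
    intro r hr
    have hrr : r ∈ rep := (List.mem_filter.mp hr).1
    exact dictSeq_getD il hnd _ (pair_mem il rep hrep r hrr).2
  rw [h1, RCVx]
  apply ofList_map_inj
  intro a ha b hb hab
  have ha' : a ∈ il := by
    obtain ⟨r, hr, h2⟩ := List.mem_map.mp ha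
    exact h2 ▸ (pair_mem il rep hrep r (List.mem_filter.mp hr).1).2
  have hb' : b ∈ il := by
    obtain ⟨r, hr, h2⟩ := List.mem_map.mp hb
    exact h2 ▸ (pair_mem il rep hrep r (List.mem_filter.mp hr).1).2
  exact idxOf_inj il hnd a b ha' hb' (by exact_mod_cast hab)

theorem keys_dictIrl (il rep : List String) (hnd : il.Nodup) (hrep : PreRep il rep) :
    (dictIrl il rep).keys = il := by
  unfold dictIrl
  rw [PySem.Dict.keys_foldl_modify_key rep (fun r => PySem.List.pyGetD (PySem.Str.split₀ r) 0 "")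
    PySem.Set.empty
    (fun _ r => fun s => PySem.Set.add s
      ((dictSeq il).getD (PySem.List.pyGetD (PySem.Str.split₀ r) 1 "") 0))]
  rw [PySem.Dict.keys_foldl_insert il (fun _ _ => PySem.Set.empty) PySem.Dict.empty]
  rw [PySem.Dict.keys_empty, PySem.Set.update_nil_left, PySem.Set.ofList_eq_self_of_nodup il hnd]
  rw [PySem.Set.update_eq_append_filter]
  have hfil : (PySem.Set.ofList (rep.map fun r =>
      PySem.List.pyGetD (PySem.Str.split₀ r) 0 "")).filter
        (fun y => !PySem.Set.contains il y) = [] := by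
    rw [List.filter_eq_nil_iff]
    intro y hy
    have hy' : y ∈ rep.map fun r => PySem.List.pyGetD (PySem.Str.split₀ r) 0 "" := by
      rwa [PySem.Set.mem_ofList] at hy
    obtain ⟨r, hr, h2⟩ := List.mem_map.mp hy'
    have hyil : y ∈ il := by rw [← h2]; exact (pair_mem il rep hrep r hr).1
    have hc : PySem.Set.contains il y = true := (PySem.Set.contains_iff il y).mpr hyil
    simp [hyil]
  rw [hfil, List.append_nil]

theorem values_dictIrl (il rep : List String) (hnd : il.Nodup) (hrep : PreRep il rep) :
    (dictIrl il rep).values =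
      il.map (fun x => (dictIrl il rep).getD x PySem.Set.empty) := by
  have hk := keys_dictIrl il rep hnd hrep
  simp only [PySem.Dict.values]
  rw [PySem.Dict.items_eq_map_keys _ (by rw [hk]; exact hnd) PySem.Set.empty, hk, List.map_map]
  rfl

theorem keys_dictRep (rep : List String) : (dictRep rep).keys = KEYS rep := by
  unfold dictRep
  rw [PySem.Dict.keys_foldl_modify_key rep (fun r => PySem.List.pyGetD (PySem.Str.split₀ r) 1 "")
    PySem.Set.empty
    (fun _ r => fun s => PySem.Set.add s (PySem.List.pyGetD (PySem.Str.split₀ r) 0 ""))]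
  rw [PySem.Dict.keys_empty, PySem.Set.update_nil_left, KEYS]
  simp only [pairOf]

theorem nodup_keys_dictRep (rep : List String) : (dictRep rep).keys.Nodup := by
  rw [keys_dictRep]
  exact PySem.Set.nodup_ofList _

theorem values_dictRep (rep : List String) :
    (dictRep rep).values = (KEYS rep).map (SD rep) := by
  simp only [PySem.Dict.values]
  rw [PySem.Dict.items_eq_map_keys _ (nodup_keys_dictRep rep) PySem.Set.empty,
    keys_dictRep, List.map_map]
  apply List.map_congr_left
  intro y _
  exact dictRep_getD rep y

theorem sum_map_ite_one_zero_nat {α : Type} (p : α → Prop) [DecidablePred p] (l : List α) :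
    (l.map (fun y => if p y then (1 : Nat) else 0)).sum = l.countP (fun y => decide (p y)) := by
  induction l with
  | nil => rfl
  | cons x t ih => by_cases h : p x <;> simp [h, ih, Nat.add_comm]

theorem getD_foldl_incrAt_id (l : List Int) (init : List Int) (i : Nat) (hi : i < init.length) :
    (l.foldl (fun res x => incrAt res x 1) init).getD i 0 =
      init.getD i 0 + (l.count (i : Int) : Int) := by
  have h := getElem_foldl_incrAt l (fun x => x) (fun _ => 1) init i hi
  rw [List.getD_eq_getElem _ _ (by
        have := length_foldl_incrAt l (fun x => x) (fun _ => 1) init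
        simp only at this ⊢
        rw [this]; exact hi),
    List.getD_eq_getElem _ _ hi]
  simp only at h
  rw [h, sum_map_one_int, List.count_eq_countP, List.countP_eq_length_filter]

theorem listRnl_flat (il rep : List String) :
    listRnl il rep = ((dictIrl il rep).values.flatten).foldl (fun l j => incrAt l j 1)
      (List.replicate il.length 0) := by
  unfold listRnl
  rw [List.foldl_flatten]

theorem length_listRnl (il rep : List String) : (listRnl il rep).length = il.length := by
  rw [listRnl_flat]
  have := length_foldl_incrAt ((dictIrl il rep).values.flatten) (fun x => x) (fun _ => 1)
    (List.replicate il.length 0)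
  simp only at this
  rw [this, List.length_replicate]

theorem count_irl (il rep : List String) (hnd : il.Nodup) (hrep : PreRep il rep) (x : String)
    (i : Nat) (hi : i < il.length) :
    List.count (i : Int) ((dictIrl il rep).getD x PySem.Set.empty) =
      if il[i] ∈ RCVx rep x then 1 else 0 := by
  rw [dictIrl_getD' il rep hnd hrep x]
  by_cases h : il[i] ∈ RCVx rep x
  · rw [if_pos h]
    apply List.count_eq_one_of_mem
    · apply List.Nodup.map_on _ (PySem.Set.nodup_ofList _)
      intro a ha b hb hab
      exact idxOf_inj il hnd a b (RCVx_sub il rep hrep x a ha) (RCVx_sub il rep hrep x b hb)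
        (by exact_mod_cast hab)
    · exact List.mem_map.mpr ⟨il[i], h, by rw [List.Nodup.idxOf_getElem hnd i hi]⟩
  · rw [if_neg h, List.count_eq_zero]
    intro hc
    obtain ⟨y, hy, h2⟩ := List.mem_map.mp hc
    have hyil : y ∈ il := RCVx_sub il rep hrep x y hy
    have hidx : il.idxOf y = i := by exact_mod_cast h2
    subst hidx
    have hgi : il[List.idxOf y il]'(List.idxOf_lt_length_of_mem hyil) = y :=
      List.getElem_idxOf _
    exact h (by rw [hgi]; exact hy)

theorem pyGetD_listRnl (il rep : List String) (hnd : il.Nodup) (hrep : PreRep il rep)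
    (i : Nat) (hi : i < il.length) :
    PySem.List.pyGetD (listRnl il rep) (i : Int) 0 = ((SD rep (il[i]'hi)).length : Int) := by
  rw [PySem.List.pyGetD_natCast, listRnl_flat,
    getD_foldl_incrAt_id _ _ i (by rw [List.length_replicate]; exact hi)]
  rw [List.getD_eq_getElem _ _ (by rw [List.length_replicate]; exact hi),
    List.getElem_replicate, zero_add]
  rw [List.count_flatten, values_dictIrl il rep hnd hrep, List.map_map]
  have hfn : ((fun l => List.count (i : Int) l) ∘ fun x => (dictIrl il rep).getD x PySem.Set.empty)
      = fun x => if il[i] ∈ RCVx rep x then 1 else 0 := by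
    funext x
    exact count_irl il rep hnd hrep x i hi
  rw [hfn, sum_map_ite_one_zero_nat]
  have hcg := List.countP_congr (l := il) (p := fun y => decide (il[i] ∈ RCVx rep y))
    (q := fun y => decide (y ∈ SD rep il[i]))
    (fun x _ => by
      simp only [decide_eq_true_eq]
      exact (mem_SD_iff_mem_RCVx rep x il[i]).symm)
  rw [hcg]
  rw [countP_nodup_sub il (SD rep il[i]) hnd (PySem.Set.nodup_ofList _)
    (SD_sub il rep hrep il[i])]

theorem mem_setPun (il rep : List String) (k : Int) (hnd : il.Nodup) (hrep : PreRep il rep)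
    (y : String) (hy : y ∈ il) :
    ((il.idxOf y : Int) ∈ setPun il rep k) ↔ k ≤ ((SD rep y).length : Int) := by
  unfold setPun
  rw [PySem.List.foldl_ite_eq_foldl_filter
    (p := fun i => PySem.List.pyGetD (listRnl il rep) i 0 ≥ k) (f := PySem.Set.add)]
  rw [show (PySem.Set.empty : PySem.Set Int) = [] from rfl, ← PySem.Set.ofList_eq_foldl,
    PySem.Set.mem_ofList, List.mem_filter]
  have hlt := List.idxOf_lt_length_of_mem hy
  have h1 : ((il.idxOf y : Int)) ∈ PySem.List.pyRange 0 ((listRnl il rep).length : Int) := by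
    rw [PySem.List.mem_pyRange_one]
    constructor
    · exact_mod_cast Nat.zero_le _
    · rw [length_listRnl]; exact_mod_cast hlt
  have h2 : PySem.List.pyGetD (listRnl il rep) ((il.idxOf y : Int)) 0
      = ((SD rep y).length : Int) := by
    rw [pyGetD_listRnl il rep hnd hrep (il.idxOf y) hlt]
    congr 1
    rw [List.getElem_idxOf hlt]
  simp [h1, h2, GE.ge]

theorem getD_foldl_incrAt {α : Type} (l : List α) (pos amt : α → Int) (init : List Int)
    (i : Nat) (hi : i < init.length) :
    (l.foldl (fun res x => incrAt res (pos x) (amt x)) init).getD i 0 =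
      init.getD i 0 + ((l.filter (fun x => pos x == (i : Int))).map amt).sum := by
  rw [List.getD_eq_getElem _ _ (by rw [length_foldl_incrAt]; exact hi),
    List.getD_eq_getElem _ _ hi, getElem_foldl_incrAt l pos amt init i hi]

theorem beq_idxOf (il : List String) (hnd : il.Nodup) (j : Nat) (hj : j < il.length)
    (x : String) (hx : x ∈ il) :
    ((il.idxOf x : Int) == (j : Int)) = (x == il[j]'hj) := by
  rw [Bool.eq_iff_iff]
  simp only [beq_iff_eq]
  constructor
  · intro h'
    have hh : il.idxOf x = j := by exact_mod_cast h'
    subst hh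
    exact (List.getElem_idxOf (List.idxOf_lt_length_of_mem hx)).symm
  · intro h'
    rw [h', List.Nodup.idxOf_getElem hnd j hj]

theorem A_getD (il rep : List String) (k : Int) (hnd : il.Nodup) (hrep : PreRep il rep)
    (j : Nat) (hj : j < il.length) :
    (solution il rep k).getD j 0 =
      ((RCVx rep (il[j]'hj)).countP
        (fun y => decide (k ≤ ((SD rep y).length : Int))) : Int) := by
  have h := getD_foldl_incrAt il (fun x => (dictSeq il).getD x 0)
    (fun x => PySem.Set.len (PySem.Set.inter ((dictIrl il rep).getD x PySem.Set.empty)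
      (setPun il rep k)))
    (List.replicate il.length 0) j (by rw [List.length_replicate]; exact hj)
  simp only at h
  rw [sol_eq, h, List.getD_eq_getElem _ _ (by rw [List.length_replicate]; exact hj),
    List.getElem_replicate, zero_add]
  have hfc : il.filter (fun x => (dictSeq il).getD x 0 == (j : Int))
      = il.filter (fun x => x == il[j]'hj) := by
    apply List.filter_congr
    intro x hx
    rw [dictSeq_getD il hnd x hx, beq_idxOf il hnd j hj x hx]
  rw [hfc, List.filter_beq, List.count_eq_one_of_mem hnd (List.getElem_mem hj),
    List.replicate_one, List.map_singleton, List.sum_singleton]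
  rw [dictIrl_getD' il rep hnd hrep (il[j]'hj)]
  simp only [PySem.Set.inter, PySem.Set.len]
  rw [← List.countP_eq_length_filter, List.countP_map]
  congr 1
  apply List.countP_congr
  intro y hy
  have hyil : y ∈ il := RCVx_sub il rep hrep _ y hy
  simp only [Function.comp_apply, decide_eq_true_eq]
  rw [PySem.Set.contains_iff, mem_setPun il rep k hnd hrep y hyil]

theorem sol_alt_eq2 (il rep : List String) (k : Int) :
    solution_alt il rep k =
      (((dictRep rep).values.filter (fun s => decide (k ≤ PySem.Set.len s))).flatten).foldl
        (fun result s => incrAt result ((dictIdx il).getD s 0) 1)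
        (List.replicate il.length 0) := by
  rw [sol_alt_eq, PySem.List.foldl_ite_eq_foldl_filter
    (p := fun senders => k ≤ PySem.Set.len senders)
    (f := fun result senders =>
      senders.foldl (fun result s => incrAt result ((dictIdx il).getD s 0) 1) result),
    List.foldl_flatten]

theorem B_getD (il rep : List String) (k : Int) (hnd : il.Nodup) (hrep : PreRep il rep)
    (j : Nat) (hj : j < il.length) :
    (solution_alt il rep k).getD j 0 =
      ((KEYS rep).countP (fun y => decide (il[j]'hj ∈ SD rep y)
        && decide (k ≤ ((SD rep y).length : Int))) : Int) := by
  have h := getD_foldl_incrAt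
    (((dictRep rep).values.filter (fun s => decide (k ≤ PySem.Set.len s))).flatten)
    (fun s => (dictIdx il).getD s 0) (fun _ => 1)
    (List.replicate il.length 0) j (by rw [List.length_replicate]; exact hj)
  simp only at h
  rw [sol_alt_eq2, h, List.getD_eq_getElem _ _ (by rw [List.length_replicate]; exact hj),
    List.getElem_replicate, zero_add, sum_map_one_int, ← List.countP_eq_length_filter]
  rw [values_dictRep, List.filter_map, countP_flatten, List.map_map]
  have hone : ∀ y ∈ (KEYS rep).filter ((fun s => decide (k ≤ PySem.Set.len s)) ∘ SD rep),
      ((fun l => List.countP (fun s => (dictIdx il).getD s 0 == (j : Int)) l) ∘ SD rep) y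
        = if il[j]'hj ∈ SD rep y then 1 else 0 := by
    intro y _
    simp only [Function.comp_apply]
    have hcg : List.countP (fun s => (dictIdx il).getD s 0 == (j : Int)) (SD rep y)
        = List.countP (fun s => s == il[j]'hj) (SD rep y) := by
      apply List.countP_congr
      intro s hs
      have hsil : s ∈ il := SD_sub il rep hrep y s hs
      rw [dictIdx_getD il hnd s hsil, beq_idxOf il hnd j hj s hsil]
    rw [hcg, ← List.count_eq_countP]
    by_cases hmem : il[j]'hj ∈ SD rep y
    · rw [if_pos hmem]
      exact List.count_eq_one_of_mem (PySem.Set.nodup_ofList _) hmem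
    · rw [if_neg hmem]
      exact List.count_eq_zero.mpr hmem
  rw [List.map_congr_left hone, sum_map_ite_one_zero_nat, List.countP_filter]
  congr 1

-- ===== VERDICT (by name: the statement is the Claim_ definition above) =====
theorem solution_spec : Claim_equal_solution := by
  intro il rep k _hdom hpre
  obtain ⟨hnd, hrep⟩ := hpre
  unfold Spec_solution
  have lenA : (solution il rep k).length = il.length := by
    have h := length_foldl_incrAt il (fun x => (dictSeq il).getD x 0)
      (fun x => PySem.Set.len (PySem.Set.inter ((dictIrl il rep).getD x PySem.Set.empty)
        (setPun il rep k)))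
      (List.replicate il.length 0)
    simp only at h
    rw [sol_eq, h, List.length_replicate]
  have lenB : (solution_alt il rep k).length = il.length := by
    have h := length_foldl_incrAt
      (((dictRep rep).values.filter (fun s => decide (k ≤ PySem.Set.len s))).flatten)
      (fun s => (dictIdx il).getD s 0) (fun _ => (1 : Int))
      (List.replicate il.length 0)
    simp only at h
    rw [sol_alt_eq2, h, List.length_replicate]
  apply List.ext_getElem (by rw [lenA, lenB])
  intro j h1 h2
  have hj : j < il.length := by rw [← lenA]; exact h1
  rw [← List.getD_eq_getElem _ 0 h1, ← List.getD_eq_getElem _ 0 h2,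
    A_getD il rep k hnd hrep j hj, B_getD il rep k hnd hrep j hj]
  congr 1
  apply countP_eq_of_iff _ _ _ _ (by unfold RCVx; exact PySem.Set.nodup_ofList _)
    (by unfold KEYS; exact PySem.Set.nodup_ofList _)
  intro y
  simp only [Bool.and_eq_true, decide_eq_true_eq]
  constructor
  · rintro ⟨hy, hk⟩
    exact ⟨RCVx_sub_KEYS rep _ y hy, (mem_SD_iff_mem_RCVx rep _ y).mpr hy, hk⟩
  · rintro ⟨_, hmem, hk⟩
    exact ⟨(mem_SD_iff_mem_RCVx rep _ y).mp hmem, hk⟩
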